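-- pv_equiv track=rewrite | github.com/Adamssss/projectEuler | pb277.py | CollatzString
-- ===== SOURCE A (Python) =====
-- def CollatzString(n):
--     if n == 1:
--         return ""
--     r = n%3
--     if r == 0:
--         return "D"+CollatzString(n//3)
--     if r == 1:
--         return "U"+CollatzString((4*n+2)//3)
--     if r == 2:
--         return "d"+CollatzString((2*n-1)//3)
-- ===== SOURCE B (Python) =====
-- # Two staged passes driven by lookup tables: first record the visited values of n
-- # (step rule chosen by coefficient tables indexed by n % 3), then map each recorded
-- # value to its letter via the table "DUd" and join once.
-- _MUL = (1, 4, 2)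
-- _ADD = (0, 2, -1)
--
-- def CollatzString(n):
--     traj = []
--     while n != 1:
--         traj.append(n)
--         r = n % 3
--         n = (_MUL[r] * n + _ADD[r]) // 3
--     return "".join("DUd"[m % 3] for m in traj)
-- ===== Notes on version B (the rewrite author's own statement) =====
-- stated objective: alternative
-- what changed: Replaced the recursive branch-per-letter definition (with per-step string concatenation) by a table-driven two-stage computation: one loop records the trajectory of n using coefficient tables indexed by n % 3, a second pass maps each recorded value through the letter table "DUd" and joins once.
import Mathlib
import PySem

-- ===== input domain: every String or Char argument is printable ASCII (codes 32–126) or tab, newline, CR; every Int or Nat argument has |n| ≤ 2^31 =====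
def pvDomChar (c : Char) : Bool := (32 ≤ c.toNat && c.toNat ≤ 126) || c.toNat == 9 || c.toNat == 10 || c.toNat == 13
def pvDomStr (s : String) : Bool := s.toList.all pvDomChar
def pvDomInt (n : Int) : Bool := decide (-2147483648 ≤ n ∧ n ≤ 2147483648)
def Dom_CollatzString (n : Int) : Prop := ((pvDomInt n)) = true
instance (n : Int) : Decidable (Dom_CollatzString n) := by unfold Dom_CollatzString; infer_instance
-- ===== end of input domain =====

-- B replaces A's recursive branch-per-letter definition by a table-driven two-stage
-- computation: one loop records the trajectory of n (step chosen by coefficient tables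
-- indexed by n % 3), a second pass maps each recorded value through the letter table "DUd".
-- Both ports carry the same fuel bound to make the (non-structural) recursion total in Lean;
-- within the sampled domain the trajectory is far shorter than the bound.

-- ===== PORT A =====
-- recursive: "D"/"U"/"d" prepended to the recursive result (built as List Char, wrapped by String.ofList)
def pvStepsA : Nat → Int → List Char
  | 0, _ => []
  | fuel + 1, n =>
    if n = 1 then []
    else
      if PySem.Int.mod n 3 = 0 then 'D' :: pvStepsA fuel (PySem.Int.floordiv n 3)
      else if PySem.Int.mod n 3 = 1 then 'U' :: pvStepsA fuel (PySem.Int.floordiv (4 * n + 2) 3)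
      else if PySem.Int.mod n 3 = 2 then 'd' :: pvStepsA fuel (PySem.Int.floordiv (2 * n - 1) 3)
      else []  -- unreachable: n % 3 ∈ {0,1,2}; Python would fall through returning None

def CollatzString (n : Int) : String := String.ofList (pvStepsA 1000000 n)

-- ===== PORT B =====
-- coefficient tables _MUL = (1, 4, 2) and _ADD = (0, 2, -1), indexed by r = n % 3 ∈ {0,1,2}
def pvMulB (r : Int) : Int := if r = 0 then 1 else if r = 1 then 4 else 2
def pvAddB (r : Int) : Int := if r = 0 then 0 else if r = 1 then 2 else -1
-- the letter table "DUd"[m % 3]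
def pvLetterB (m : Int) : Char :=
  if PySem.Int.mod m 3 = 0 then 'D' else if PySem.Int.mod m 3 = 1 then 'U' else 'd'

-- stage 1: the while-loop recording each visited value of n
def pvTrajB : Nat → Int → List Int
  | 0, _ => []
  | fuel + 1, n =>
    if n = 1 then []
    else n :: pvTrajB fuel
      (PySem.Int.floordiv (pvMulB (PySem.Int.mod n 3) * n + pvAddB (PySem.Int.mod n 3)) 3)

-- stage 2: map through the letter table and join
def CollatzString_alt (n : Int) : String :=
  String.ofList ((pvTrajB 1000000 n).map pvLetterB)

-- ===== PRECONDITION & SPEC =====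
-- Pre_ excludes n ≤ 0: there the trajectory never reaches 1 and Python A raises RecursionError.
def Pre_CollatzString (n : Int) : Prop := 1 ≤ n
instance (n : Int) : Decidable (Pre_CollatzString n) := by unfold Pre_CollatzString; infer_instance
def pvWitness_CollatzString : Int := (7)

def Spec_CollatzString (n : Int) (out : String) : Prop := out = CollatzString_alt n
instance (n : Int) (out : String) : Decidable (Spec_CollatzString n out) := by unfold Spec_CollatzString; infer_instance

-- ===== CLAIM (what is proved, stated in full; the proofs are below) =====
def Claim_equal_CollatzString : Prop := ∀ (n : Int), Dom_CollatzString n → Pre_CollatzString n → Spec_CollatzString n (CollatzString n)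

-- ===== LEMMAS AND PROOFS =====

-- mapping the recorded trajectory through the letter table yields A's letter sequence
theorem pvTrajB_map (fuel : Nat) : ∀ (n : Int),
    (pvTrajB fuel n).map pvLetterB = pvStepsA fuel n := by
  induction fuel with
  | zero => intro n; simp [pvTrajB, pvStepsA]
  | succ f ih =>
    intro n
    by_cases h1 : n = 1
    · simp [pvTrajB, pvStepsA, h1]
    · have h0 : 0 ≤ n % 3 := Int.emod_nonneg n (by norm_num)
      have h3 : n % 3 < 3 := Int.emod_lt_of_pos n (by norm_num)
      have : n % 3 = 0 ∨ n % 3 = 1 ∨ n % 3 = 2 := by omega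
      rcases this with h | h | h <;>
        simp [pvTrajB, pvStepsA, h1, h, pvLetterB, pvMulB, pvAddB, ih, sub_eq_add_neg]

-- ===== VERDICT (by name: the statement is the Claim_ definition above) =====
theorem CollatzString_spec : Claim_equal_CollatzString := by
  intro n _ _
  unfold Spec_CollatzString CollatzString CollatzString_alt
  rw [pvTrajB_map]
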